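-- pv_equiv track=rewrite | github.com/balexander123/bioinformaticsAlgorithms | 1_9_1_Week_3_Code_Graded_Prob.py | appears_in
-- ===== SOURCE A (Python) =====
-- def hamming_distance(p, q):
--     if len(p) != len(q):
--         return -1
--     hamming_count = 0
--     for i, val in enumerate(p):
--         if p[i] != q[i]:
--             hamming_count += 1
--     return hamming_count
--
-- def k_mer_patterns_from_text(text, k):
--     k_mer_patterns = []
--     for i in range(0, len(text) - k + 1):
--         k_mer_patterns.append(text[i:i + k])
--     return k_mer_patterns
--
-- def appears_in(dna, pattern, d):
--     k = len(pattern)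
--     num_strings = len(dna)
--     for i in range(0, num_strings):
--         num_matches = 0
--         for q in k_mer_patterns_from_text(dna[i], k):
--             if hamming_distance(pattern, q) <= d:
--                 num_matches += 1
--         if num_matches == 0:
--             return False
--     return True
-- ===== SOURCE B (Python) =====
-- def appears_in(dna, pattern, d):
--     k = len(pattern)
--     for s in dna:
--         m = len(s) - k + 1
--         if m <= 0:
--             return False
--         cnt = [0] * m
--         for j in range(k):
--             c = pattern[j]
--             for i in range(m):
--                 if s[i + j] == c:
--                     cnt[i] += 1
--         if max(cnt) < k - d:
--             return False
--     return True
-- ===== Notes on version B (the rewrite author's own statement) =====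
-- stated objective: alternative
-- what changed: Instead of recomputing a hamming distance for every sliced k-mer, B builds per string a transposed match-count table (one sweep of the string per pattern position, counting matching characters per window) and accepts the string iff max(cnt) >= k - d; no substrings are allocated and no per-window distance loop exists.
import Mathlib
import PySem

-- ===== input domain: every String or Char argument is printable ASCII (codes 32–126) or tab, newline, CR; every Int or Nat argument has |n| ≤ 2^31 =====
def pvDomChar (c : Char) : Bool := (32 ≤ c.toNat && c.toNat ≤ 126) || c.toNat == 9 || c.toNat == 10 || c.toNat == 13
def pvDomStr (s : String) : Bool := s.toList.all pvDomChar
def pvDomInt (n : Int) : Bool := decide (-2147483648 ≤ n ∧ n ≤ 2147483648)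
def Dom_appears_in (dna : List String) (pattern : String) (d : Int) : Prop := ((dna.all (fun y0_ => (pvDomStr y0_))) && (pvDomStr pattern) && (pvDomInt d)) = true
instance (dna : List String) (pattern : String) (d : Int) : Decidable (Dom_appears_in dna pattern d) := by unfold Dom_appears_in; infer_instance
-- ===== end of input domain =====

-- B replaces A's per-window hamming-distance recomputation (one distance loop per k-mer)
-- by a transposed per-string match-count table (one pass per pattern position), then tests
-- max(cnt) ≥ k - d (objective: alternative; same asymptotic cost, no substring allocation).

-- ===== PORT A =====
-- Python locals used once (k, num_strings) are inlined; loops over range(len(dna)) /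
-- enumerate are ported via PySem.List.pyRange / PySem.List.enumerate.
def hamming_distance (p q : String) : Int :=
  if PySem.Str.len p ≠ PySem.Str.len q then -1
  else
    (PySem.List.enumerate p.toList 0).foldl
      (fun hamming_count iv =>
        -- enumerate indices are in range for both strings (equal lengths), so pyGet?
        -- is `some` on both sides and Option equality is Python's char comparison
        if PySem.Str.pyGet? p iv.1 ≠ PySem.Str.pyGet? q iv.1 then hamming_count + 1
        else hamming_count)
      0

def k_mer_patterns_from_text (text : String) (k : Int) : List String :=
  (PySem.List.pyRange 0 (PySem.Str.len text - k + 1) 1).foldl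
    (fun acc i => acc ++ [PySem.Str.slice text (some i) (some (i + k))]) []

def appearsInLoopA (pattern : String) (d k : Int) (dna : List String) : List Int → Bool
  | [] => true
  | i :: rest =>
    if (k_mer_patterns_from_text (PySem.List.pyGetD dna i "") k).foldl
        (fun n q => if hamming_distance pattern q ≤ d then n + 1 else n) (0 : Int) = 0
    then false
    else appearsInLoopA pattern d k dna rest

def appears_in (dna : List String) (pattern : String) (d : Int) : Bool :=
  appearsInLoopA pattern d (PySem.Str.len pattern) dna
    (PySem.List.pyRange 0 (dna.length : Int) 1)

-- ===== PORT B =====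
-- Python locals used once (m, cnt, c) are inlined; indices produced by the ranges are
-- non-negative and in range, so `i.toNat` does not clamp and pyGet? is `some` on both
-- sides; Python's max(cnt) is taken on a nonempty cnt (m > 0), the default is never used.
def altStringLoop (pattern : String) (d k : Int) : List String → Bool
  | [] => true
  | s :: rest =>
    if PySem.Str.len s - k + 1 ≤ 0 then false
    else
      if (PySem.List.max?
            ((PySem.List.pyRange 0 k 1).foldl
              (fun cnt j =>
                (PySem.List.pyRange 0 (PySem.Str.len s - k + 1) 1).foldl
                  (fun cnt i =>
                    if PySem.Str.pyGet? s (i + j) = PySem.Str.pyGet? pattern j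
                    then cnt.modify i.toNat (· + 1) else cnt)
                  cnt)
              (List.replicate (PySem.Str.len s - k + 1).toNat (0 : Int)))
            (fun x => x)).getD 0 < k - d
      then false
      else altStringLoop pattern d k rest

def appears_in_alt (dna : List String) (pattern : String) (d : Int) : Bool :=
  altStringLoop pattern d (PySem.Str.len pattern) dna

-- ===== PRECONDITION & SPEC =====
def Spec_appears_in (dna : List String) (pattern : String) (d : Int) (out : Bool) : Prop := out = appears_in_alt dna pattern d
instance (dna : List String) (pattern : String) (d : Int) (out : Bool) : Decidable (Spec_appears_in dna pattern d out) := by unfold Spec_appears_in; infer_instance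

-- ===== CLAIM (what is proved, stated in full; the proofs are below) =====
def Claim_equal_appears_in : Prop := ∀ (dna : List String) (pattern : String) (d : Int), Dom_appears_in dna pattern d → Spec_appears_in dna pattern d (appears_in dna pattern d)

-- ===== LEMMAS AND PROOFS =====

-- number of mismatches between the pattern P and the window of S starting at i
def mismCnt (P S : List Char) (i : Nat) : Nat :=
  (List.range P.length).countP (fun j => !(S[i + j]? == P[j]?))

-- number of matches between the pattern P and the window of S starting at i
def matchCnt (P S : List Char) (i : Nat) : Nat :=
  (List.range P.length).countP (fun j => S[i + j]? == P[j]?)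

-- "some window of S is within distance d of P"
def strGood (P S : List Char) (d : Int) : Bool :=
  (List.range (S.length + 1 - P.length)).any (fun i => decide ((mismCnt P S i : Int) ≤ d))

-- common reference shape of both loops
def specLoop (P : List Char) (d : Int) : List String → Bool
  | [] => true
  | s :: rest => if strGood P s.toList d then specLoop P d rest else false

lemma match_add_mism (P S : List Char) (i : Nat) :
    matchCnt P S i + mismCnt P S i = P.length := by
  have h := List.length_eq_countP_add_countP (p := fun j => S[i + j]? == P[j]?)
      (l := List.range P.length)
  have h2 : (List.range P.length).countP (fun a => decide ¬((S[i + a]? == P[a]?) = true))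
      = (List.range P.length).countP (fun j => !(S[i + j]? == P[j]?)) :=
    List.countP_congr (fun x _ => by cases S[i + x]? == P[x]? <;> simp)
  rw [List.length_range, h2] at h
  unfold matchCnt mismCnt
  omega

lemma good_iff (P S : List Char) (d : Int) :
    strGood P S d = true ↔
      ∃ i, i < S.length + 1 - P.length ∧ ((mismCnt P S i : Int) ≤ d) := by
  unfold strGood
  rw [List.any_eq_true]
  constructor
  · rintro ⟨i, hi, hd⟩; exact ⟨i, List.mem_range.mp hi, of_decide_eq_true hd⟩
  · rintro ⟨i, hi, hd⟩; exact ⟨i, List.mem_range.mpr hi, decide_eq_true hd⟩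

lemma match_lt_iff (P S : List Char) (i : Nat) (d : Int) :
    ((matchCnt P S i : Int) < (P.length : Int) - d) ↔ ¬ ((mismCnt P S i : Int) ≤ d) := by
  have := match_add_mism P S i
  omega

lemma kmer_eq (t : String) (k : Int) :
    k_mer_patterns_from_text t k =
      (PySem.List.pyRange 0 (PySem.Str.len t - k + 1) 1).map
        (fun i => PySem.Str.slice t (some i) (some (i + k))) := by
  unfold k_mer_patterns_from_text
  rw [PySem.List.foldl_append_singleton_eq_map]
  simp

lemma enum_fold_count (p q : String) :
    ∀ (cs : List Char) (st : Nat) (acc : Int),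
      (PySem.List.enumerate cs ((st : Nat) : Int)).foldl
          (fun c iv => if PySem.Str.pyGet? p iv.1 ≠ PySem.Str.pyGet? q iv.1 then c + 1 else c) acc
        = acc + ((List.range cs.length).countP
            (fun j => !(p.toList[st + j]? == q.toList[st + j]?)) : Int) := by
  intro cs
  induction cs with
  | nil => intro st acc; simp [PySem.List.enumerate_nil]
  | cons c0 cs ih =>
    intro st acc
    rw [PySem.List.enumerate_cons]
    simp only [List.foldl_cons]
    rw [show ((st : Nat) : Int) + 1 = (((st + 1 : Nat)) : Int) from by push_cast; ring]
    rw [ih (st + 1)]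
    rw [List.length_cons, List.range_succ_eq_map, List.countP_cons, List.countP_map]
    have hshift : (List.range cs.length).countP
          ((fun j => !(p.toList[st + j]? == q.toList[st + j]?)) ∘ Nat.succ)
        = (List.range cs.length).countP
            (fun j => !(p.toList[st + 1 + j]? == q.toList[st + 1 + j]?)) := by
      apply List.countP_congr
      intro x _
      simp only [Function.comp_apply]
      rw [show st + Nat.succ x = st + 1 + x from by omega]
    rw [hshift]
    have hhead : (PySem.Str.pyGet? p ((st : Nat) : Int) ≠ PySem.Str.pyGet? q ((st : Nat) : Int))
        ↔ (!(p.toList[st + 0]? == q.toList[st + 0]?)) = true := by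
      simp [beq_eq_false_iff_ne]
    by_cases hd : PySem.Str.pyGet? p ((st : Nat) : Int) ≠ PySem.Str.pyGet? q ((st : Nat) : Int)
    · rw [if_pos hd, hhead.mp hd]
      simp
      try omega
    · rw [if_neg hd]
      have hp0 : (!(p.toList[st + 0]? == q.toList[st + 0]?)) = false := by
        cases h2 : (!(p.toList[st + 0]? == q.toList[st + 0]?))
        · rfl
        · exact absurd (hhead.mpr h2) hd
      rw [hp0]
      simp
      try omega

lemma ham_eq (p q : String) (h : p.toList.length = q.toList.length) :
    hamming_distance p q =
      ((List.range p.toList.length).countP (fun j => !(p.toList[j]? == q.toList[j]?)) : Int) := by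
  unfold hamming_distance
  rw [if_neg (by rw [PySem.Str.len_eq, PySem.Str.len_eq, h]; exact fun hne => hne rfl)]
  have he := enum_fold_count p q p.toList 0 0
  simp only [Nat.cast_zero, zero_add] at he
  exact he

lemma ham_window (pattern s : String) (i : Nat)
    (hik : i + pattern.toList.length ≤ s.toList.length) :
    hamming_distance pattern
        (PySem.Str.slice s (some (i : Int)) (some ((i : Int) + PySem.Str.len pattern)))
      = (mismCnt pattern.toList s.toList i : Int) := by
  have hw : (PySem.Str.slice s (some (i : Int)) (some ((i : Int) + PySem.Str.len pattern))).toList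
      = (s.toList.drop i).take pattern.toList.length := by
    rw [PySem.Str.len_eq, PySem.Str.toList_slice, PySem.Chars.slice_eq_listSlice]
    exact PySem.List.slice_natCast_add s.toList i pattern.toList.length
  have hlen : pattern.toList.length =
      (PySem.Str.slice s (some (i : Int)) (some ((i : Int) + PySem.Str.len pattern))).toList.length := by
    rw [hw, List.length_take, List.length_drop]
    omega
  rw [ham_eq _ _ hlen]
  unfold mismCnt
  have hcp : (List.range pattern.toList.length).countP
        (fun j => !(pattern.toList[j]? ==
          (PySem.Str.slice s (some (i : Int)) (some ((i : Int) + PySem.Str.len pattern))).toList[j]?))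
      = (List.range pattern.toList.length).countP
          (fun j => !(s.toList[i + j]? == pattern.toList[j]?)) := by
    apply List.countP_congr
    intro j hj
    have hj' := List.mem_range.mp hj
    rw [hw, List.getElem?_take_of_lt hj', List.getElem?_drop]
    simp only [Bool.not_eq_true', beq_eq_false_iff_ne]
    exact ne_comm
  rw [hcp]

lemma A_str (pattern s : String) (d : Int) :
    ((k_mer_patterns_from_text s (PySem.Str.len pattern)).foldl
        (fun n q => if hamming_distance pattern q ≤ d then n + 1 else n) (0 : Int) = 0)
      ↔ strGood pattern.toList s.toList d = false := by
  rw [kmer_eq]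
  by_cases hks : s.toList.length < pattern.toList.length
  · rw [PySem.List.pyRange_one_eq_nil (by rw [PySem.Str.len_eq, PySem.Str.len_eq]; omega)]
    unfold strGood
    rw [show s.toList.length + 1 - pattern.toList.length = 0 from by omega]
    simp
  · have hmn : PySem.Str.len s - PySem.Str.len pattern + 1
        = ((s.toList.length + 1 - pattern.toList.length : Nat) : Int) := by
      rw [PySem.Str.len_eq, PySem.Str.len_eq]; omega
    rw [hmn, PySem.List.pyRange_zero_natCast, List.foldl_map, List.foldl_map,
        PySem.List.foldl_ite_add_one]
    have hc : ∀ i ∈ List.range (s.toList.length + 1 - pattern.toList.length),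
        decide (hamming_distance pattern
            (PySem.Str.slice s (some ((i : Nat) : Int))
              (some (((i : Nat) : Int) + PySem.Str.len pattern))) ≤ d)
          = decide ((mismCnt pattern.toList s.toList i : Int) ≤ d) := by
      intro i hi
      rw [List.mem_range] at hi
      rw [ham_window pattern s i (by omega)]
    rw [List.countP_congr (fun x hx => by rw [hc x hx])]
    unfold strGood
    have h0 : ∀ (c : Nat), ((0 : Int) + (c : Int) = 0) ↔ c = 0 := by intro c; omega
    rw [h0, List.countP_eq_zero, List.any_eq_false]

lemma foldl_range_modify_getElem? (t : Nat → Prop) [DecidablePred t] (n : Nat) :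
    ∀ (l : List Int) (q : Nat),
      ((List.range n).foldl (fun c i => if t i then c.modify i (· + 1) else c) l)[q]?
        = if q < n ∧ t q then l[q]?.map (· + 1) else l[q]? := by
  induction n with
  | zero => intro l q; simp
  | succ n ih =>
    intro l q
    rw [List.range_succ, List.foldl_append]
    simp only [List.foldl_cons, List.foldl_nil]
    by_cases htn : t n
    · rw [if_pos htn, List.getElem?_modify, ih]
      by_cases hq : q = n
      · subst hq
        rw [if_neg (fun hc => Nat.lt_irrefl q hc.1), if_pos ⟨Nat.lt_succ_self q, htn⟩]
        cases l[q]? <;> simp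
      · have hnq : n ≠ q := fun h => hq h.symm
        by_cases hql : q < n ∧ t q
        · rw [if_pos hql, if_pos ⟨Nat.lt_succ_of_lt hql.1, hql.2⟩]
          cases l[q]? <;> simp [hnq]
        · have hcond : ¬ (q < n + 1 ∧ t q) := by
            rintro ⟨h1, h2⟩
            have hlt : q < n := by omega
            exact hql ⟨hlt, h2⟩
          rw [if_neg hql, if_neg hcond]
          cases l[q]? <;> simp [hnq]
    · rw [if_neg htn, ih]
      by_cases hql : q < n ∧ t q
      · rw [if_pos hql, if_pos ⟨Nat.lt_succ_of_lt hql.1, hql.2⟩]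
      · have hcond : ¬ (q < n + 1 ∧ t q) := by
          rintro ⟨h1, h2⟩
          rcases Nat.lt_succ_iff_lt_or_eq.mp h1 with h | h
          · exact hql ⟨h, h2⟩
          · exact htn (h ▸ h2)
        rw [if_neg hql, if_neg hcond]

lemma outer_getElem? (T : Nat → Nat → Prop) [∀ i j : Nat, Decidable (T i j)] (mN kk : Nat) :
    ∀ (q : Nat),
      ((List.range kk).foldl
          (fun c j => (List.range mN).foldl
            (fun c i => if T i j then c.modify i (· + 1) else c) c)
          (List.replicate mN (0 : Int)))[q]?
        = (List.replicate mN (0 : Int))[q]?.map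
            (fun v => v + ((List.range kk).countP (fun j => decide (T q j)) : Int)) := by
  induction kk with
  | zero => intro q; cases h : (List.replicate mN (0 : Int))[q]? <;> simp [h]
  | succ kk ih =>
    intro q
    rw [List.range_succ, List.foldl_append]
    simp only [List.foldl_cons, List.foldl_nil]
    rw [foldl_range_modify_getElem? (fun i => T i kk) mN _ q, ih q]
    rw [List.countP_append]
    by_cases hq : q < mN
    · have hrep : (List.replicate mN (0 : Int))[q]? = some 0 := by
        rw [List.getElem?_replicate, if_pos hq]
      rw [hrep]
      by_cases ht : T q kk
      · rw [if_pos ⟨hq, ht⟩]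
        simp [ht]
        try omega
      · rw [if_neg (fun hc => ht hc.2)]
        simp [ht]
        try omega
    · have hrep : (List.replicate mN (0 : Int))[q]? = none := by
        rw [List.getElem?_replicate, if_neg hq]
      rw [hrep, if_neg (fun hc => hq hc.1)]
      simp

lemma cnt_eq (pattern s : String) (hk : pattern.toList.length ≤ s.toList.length) :
    ((PySem.List.pyRange 0 (PySem.Str.len pattern) 1).foldl
        (fun cnt j =>
          (PySem.List.pyRange 0 (PySem.Str.len s - PySem.Str.len pattern + 1) 1).foldl
            (fun cnt i =>
              if PySem.Str.pyGet? s (i + j) = PySem.Str.pyGet? pattern j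
              then cnt.modify i.toNat (· + 1) else cnt)
            cnt)
        (List.replicate (PySem.Str.len s - PySem.Str.len pattern + 1).toNat (0 : Int)))
      = (List.range (s.toList.length + 1 - pattern.toList.length)).map
          (fun i => ((matchCnt pattern.toList s.toList i : Nat) : Int)) := by
  have hmn : PySem.Str.len s - PySem.Str.len pattern + 1
      = ((s.toList.length + 1 - pattern.toList.length : Nat) : Int) := by
    rw [PySem.Str.len_eq, PySem.Str.len_eq]; omega
  have hmt : (PySem.Str.len s - PySem.Str.len pattern + 1).toNat
      = s.toList.length + 1 - pattern.toList.length := by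
    rw [hmn]; simp
  rw [hmt, hmn, show (PySem.Str.len pattern) = ((pattern.toList.length : Nat) : Int) from
        PySem.Str.len_eq pattern,
      PySem.List.pyRange_zero_natCast, PySem.List.pyRange_zero_natCast, List.foldl_map]
  have houter : ∀ (acc : List Int), ∀ j ∈ List.range pattern.toList.length,
      (List.foldl
          (fun cnt i =>
            if PySem.Str.pyGet? s (i + ((j : Nat) : Int)) = PySem.Str.pyGet? pattern ((j : Nat) : Int)
            then cnt.modify i.toNat (· + 1) else cnt)
          acc ((List.range (s.toList.length + 1 - pattern.toList.length)).map (fun (k : Nat) => (k : Int))))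
        = List.foldl
            (fun cnt i => if s.toList[i + j]? = pattern.toList[j]? then cnt.modify i (· + 1) else cnt)
            acc (List.range (s.toList.length + 1 - pattern.toList.length)) := by
    intro acc j _
    rw [List.foldl_map]
    apply PySem.List.foldl_congr_mem
    intro acc2 i _
    simp
    rw [show ((i : Nat) : Int) + ((j : Nat) : Int) = (((i + j : Nat)) : Int) from by push_cast; ring,
        PySem.List.pyGet?_natCast]
  have hmain := PySem.List.foldl_congr_mem (List.range pattern.toList.length)
      (fun (acc : List Int) (j : Nat) =>
        List.foldl
          (fun cnt i =>
            if PySem.Str.pyGet? s (i + ((j : Nat) : Int)) = PySem.Str.pyGet? pattern ((j : Nat) : Int)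
            then cnt.modify i.toNat (fun x => x + 1) else cnt)
          acc ((List.range (s.toList.length + 1 - pattern.toList.length)).map (fun (k : Nat) => (k : Int))))
      (fun (acc : List Int) (j : Nat) =>
        List.foldl
          (fun cnt i => if s.toList[i + j]? = pattern.toList[j]? then cnt.modify i (fun x => x + 1) else cnt)
          acc (List.range (s.toList.length + 1 - pattern.toList.length)))
      (List.replicate (s.toList.length + 1 - pattern.toList.length) (0 : Int)) houter
  rw [hmain]
  apply List.ext_getElem?
  intro q
  rw [outer_getElem? (fun i j => s.toList[i + j]? = pattern.toList[j]?)
        (s.toList.length + 1 - pattern.toList.length) pattern.toList.length q]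
  by_cases hq : q < s.toList.length + 1 - pattern.toList.length
  · rw [List.getElem?_replicate, if_pos hq, List.getElem?_map, List.getElem?_range hq]
    simp only [Option.map_some, Option.some.injEq]
    rw [zero_add]
    have hcq : (List.range pattern.toList.length).countP
          (fun j => decide (s.toList[q + j]? = pattern.toList[j]?))
        = matchCnt pattern.toList s.toList q := by
      unfold matchCnt
      exact List.countP_congr (fun x _ => by simp)
    rw [hcq]
  · rw [List.getElem?_replicate, if_neg hq, List.getElem?_map,
        List.getElem?_eq_none (by simp only [List.length_range]; omega)]
    simp

lemma B_str (pattern s : String) (d : Int) (rest : List String) :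
    altStringLoop pattern d (PySem.Str.len pattern) (s :: rest)
      = (if strGood pattern.toList s.toList d
         then altStringLoop pattern d (PySem.Str.len pattern) rest else false) := by
  simp only [altStringLoop]
  by_cases hks : s.toList.length < pattern.toList.length
  · rw [if_pos (by rw [PySem.Str.len_eq, PySem.Str.len_eq]; omega)]
    have hg : strGood pattern.toList s.toList d = false := by
      unfold strGood
      rw [show s.toList.length + 1 - pattern.toList.length = 0 from by omega]
      simp
    rw [hg]
    simp
  · rw [if_neg (by rw [PySem.Str.len_eq, PySem.Str.len_eq]; omega)]
    rw [cnt_eq pattern s (by omega)]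
    rw [PySem.Str.len_eq pattern]
    have hne : ((List.range (s.toList.length + 1 - pattern.toList.length)).map
        (fun i => ((matchCnt pattern.toList s.toList i : Nat) : Int))) ≠ [] := by
      intro hnil
      have hlen0 := congrArg List.length hnil
      simp only [List.length_map, List.length_range, List.length_nil] at hlen0
      omega
    obtain ⟨mx, hmx⟩ : ∃ mx, PySem.List.max?
        ((List.range (s.toList.length + 1 - pattern.toList.length)).map
          (fun i => ((matchCnt pattern.toList s.toList i : Nat) : Int))) (fun x => x) = some mx := by
      cases h : PySem.List.max?
          ((List.range (s.toList.length + 1 - pattern.toList.length)).map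
            (fun i => ((matchCnt pattern.toList s.toList i : Nat) : Int))) (fun x => x) with
      | none => exact absurd ((PySem.List.max?_eq_none_iff _ _).mp h) hne
      | some mx => exact ⟨mx, rfl⟩
    rw [hmx]
    simp only [Option.getD_some]
    have hmem := PySem.List.max?_mem hmx
    have hmax := PySem.List.max?_isMax hmx
    by_cases hg : strGood pattern.toList s.toList d
    · rw [if_pos hg]
      obtain ⟨i, hi, hid⟩ := (good_iff _ _ _).mp hg
      have h1 : ((matchCnt pattern.toList s.toList i : Nat) : Int) ∈
          (List.range (s.toList.length + 1 - pattern.toList.length)).map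
            (fun i => ((matchCnt pattern.toList s.toList i : Nat) : Int)) :=
        List.mem_map.mpr ⟨i, List.mem_range.mpr hi, rfl⟩
      have h2 := hmax _ h1
      rw [if_neg (fun hlt =>
        (match_lt_iff pattern.toList s.toList i d).mp (lt_of_le_of_lt h2 hlt) hid)]
    · rw [if_neg hg]
      obtain ⟨i, hi, hieq⟩ := List.mem_map.mp hmem
      have hbad : ¬ ((mismCnt pattern.toList s.toList i : Int) ≤ d) :=
        fun hle => hg ((good_iff _ _ _).mpr ⟨i, List.mem_range.mp hi, hle⟩)
      have hlt := (match_lt_iff pattern.toList s.toList i d).mpr hbad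
      rw [if_pos (hieq ▸ hlt)]

lemma B_loop_eq (pattern : String) (d : Int) (dna : List String) :
    altStringLoop pattern d (PySem.Str.len pattern) dna = specLoop pattern.toList d dna := by
  induction dna with
  | nil => rfl
  | cons s rest ih =>
    rw [B_str]
    unfold specLoop
    rw [ih]

lemma A_loop_eq (pattern : String) (d : Int) (dna : List String) :
    ∀ (suffix : List String) (a : Nat), dna.drop a = suffix →
      appearsInLoopA pattern d (PySem.Str.len pattern) dna
          (PySem.List.pyRange (a : Int) (dna.length : Int) 1)
        = specLoop pattern.toList d suffix := by
  intro suffix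
  induction suffix with
  | nil =>
    intro a ha
    have hlen : dna.length ≤ a := by
      have := congrArg List.length ha
      simp at this
      omega
    rw [PySem.List.pyRange_one_eq_nil (by exact_mod_cast hlen)]
    rfl
  | cons s rest ih =>
    intro a ha
    have hlen : a < dna.length := by
      have := congrArg List.length ha
      simp at this
      omega
    have hget : dna[a]? = some s := by
      have := congrArg List.head? ha
      simpa [List.head?_drop] using this
    have hgd : PySem.List.pyGetD dna (a : Int) "" = s := by
      rw [PySem.List.pyGetD_natCast, List.getD_eq_getElem?_getD, hget]
      rfl
    rw [PySem.List.pyRange_one_cons (by exact_mod_cast hlen)]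
    rw [show (a : Int) + 1 = (((a + 1 : Nat)) : Int) from by push_cast; ring]
    simp only [appearsInLoopA]
    rw [hgd]
    unfold specLoop
    by_cases hg : strGood pattern.toList s.toList d = true
    · rw [if_pos hg]
      have hne : ¬ ((k_mer_patterns_from_text s (PySem.Str.len pattern)).foldl
          (fun n q => if hamming_distance pattern q ≤ d then n + 1 else n) (0 : Int) = 0) := by
        intro h0
        rw [(A_str pattern s d).mp h0] at hg
        exact Bool.false_ne_true hg
      rw [if_neg hne]
      exact ih (a + 1) (by
        have h2' := congrArg List.tail ha
        simpa [List.tail_drop] using h2')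
    · have hg' : strGood pattern.toList s.toList d = false := by
        cases h : strGood pattern.toList s.toList d
        · rfl
        · exact absurd h hg
      rw [if_neg hg]
      rw [if_pos ((A_str pattern s d).mpr hg')]

-- ===== VERDICT (by name: the statement is the Claim_ definition above) =====
theorem appears_in_spec : Claim_equal_appears_in := by
  intro dna pattern d _
  unfold Spec_appears_in appears_in appears_in_alt
  rw [B_loop_eq]
  simpa using A_loop_eq pattern d dna dna 0 rfl
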